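-- pv_equiv track=rewrite | github.com/ProteinUniverseAtlas/protscape | scripts/.ipynb_checkpoints/astrochop-checkpoint.py | convert_interval_to_map
-- ===== SOURCE A (Python) =====
-- def convert_interval_to_map(domains, nres):
--
-- 	resmap = [None for i in range(nres)]
-- 	for indx, domain in enumerate(domains):
-- 		parts = domain.split('_')
-- 		for part in parts:
-- 			try:
-- 				start, end = [int(i) for i in part.split('-')]
-- 				if start == 0:
-- 					start = 1
-- 				for i in range(start-1, end):
-- 					resmap[i] = indx+1
-- 			except:
-- 				pass
--
-- 	return resmap
-- ===== SOURCE B (Python) =====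
-- def convert_interval_to_map(domains, nres):
--     # Gather all parseable (value, lo, hi) interval claims once, then decide each
--     # residue's owner directly: the last claim covering it wins (= A's last write).
--     claims = []
--     for indx, domain in enumerate(domains):
--         for part in domain.split('_'):
--             try:
--                 start, end = [int(i) for i in part.split('-')]
--             except:
--                 continue
--             if start == 0:
--                 start = 1
--             claims.append((indx + 1, start - 1, end))
--
--     def owner(i):
--         best = None
--         for value, lo, hi in claims:
--             if lo <= i < hi:
--                 best = value
--         return best
--
--     return [owner(i) for i in range(nres)]
-- ===== Notes on version B (the rewrite author's own statement) =====
-- stated objective: alternative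
-- what changed: Instead of allocating the residue array and repeatedly painting/overwriting ranges (with partial writes cut short by IndexError), B parses all interval claims once into a list and then computes each residue's owner directly as the last claim covering it, building the result in one comprehension.
import Mathlib
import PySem

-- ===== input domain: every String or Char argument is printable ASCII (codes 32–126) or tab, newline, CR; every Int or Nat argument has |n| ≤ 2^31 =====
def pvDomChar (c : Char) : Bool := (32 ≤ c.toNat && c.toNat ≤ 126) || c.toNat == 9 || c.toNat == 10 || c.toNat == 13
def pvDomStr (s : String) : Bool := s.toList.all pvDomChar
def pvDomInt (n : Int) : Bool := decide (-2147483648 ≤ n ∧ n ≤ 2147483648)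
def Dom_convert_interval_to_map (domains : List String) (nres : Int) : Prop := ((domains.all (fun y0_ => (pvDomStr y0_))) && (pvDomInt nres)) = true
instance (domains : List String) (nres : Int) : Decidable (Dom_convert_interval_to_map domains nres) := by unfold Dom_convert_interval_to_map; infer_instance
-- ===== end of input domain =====

-- B replaces A's paint-and-overwrite loop over a mutable residue array by a gather-then-query
-- pass: parse all interval claims once, then compute each residue's owner (last covering claim)
-- directly in one comprehension (objective: alternative decomposition, same exact values).

-- ===== PORT A =====
-- 'for i in range(start-1, end): resmap[i] = indx+1' inside the bare try/except:
-- an out-of-range index raises IndexError, which the except catches, abandoning the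
-- rest of THIS part but keeping the writes already done. PySem.List.pySet? is exact
-- Python item assignment (none = IndexError, negative indices wrap).
def pvPaintA (m : List (Option Int)) (i e v : Int) : List (Option Int) :=
  if i < e then
    match PySem.List.pySet? m i (some v) with
    | some m' => pvPaintA m' (i + 1) e v
    | none => m
  else m
termination_by (e - i).toNat
decreasing_by omega

-- one 'part': 'start, end = [int(i) for i in part.split('-')]' — any ValueError or a
-- wrong number of pieces lands in the except and leaves resmap unchanged.
-- part.split('-') with the non-empty literal separator is exactly PySem.Chars.splitOn part ['-']
-- (PySem.Str.split? unfolds to it for a non-empty separator).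
def pvPartA (indx : Int) (m : List (Option Int)) (part : List Char) : List (Option Int) :=
  match (PySem.Chars.splitOn part ['-']).mapM PySem.Int.ofChars? with
  | some [s, e] => pvPaintA m ((if s = 0 then 1 else s) - 1) e (indx + 1)
  | _ => m

def convert_interval_to_map (domains : List String) (nres : Int) : List (Option Int) :=
  let resmap := (PySem.List.pyRange 0 nres 1).map (fun _ => (none : Option Int))
  (PySem.List.enumerate domains).foldl
    (fun m p => (PySem.Chars.splitOn p.2.toList ['_']).foldl (fun m part => pvPartA p.1 m part) m)
    resmap

-- ===== PORT B =====
-- parse one part into its claim bounds (lo = start-1 after the start==0 bump, hi = end)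
def pvParseB (part : List Char) : Option (Int × Int) :=
  match (PySem.Chars.splitOn part ['-']).mapM PySem.Int.ofChars? with
  | some [s, e] => some ((if s = 0 then 1 else s) - 1, e)
  | _ => none

-- all (value, lo, hi) claims, in program order
def pvClaims (domains : List String) : List (Int × Int × Int) :=
  (PySem.List.enumerate domains).flatMap (fun p =>
    (PySem.Chars.splitOn p.2.toList ['_']).filterMap (fun part =>
      (pvParseB part).map (fun q => (p.1 + 1, q.1, q.2))))

-- owner(i): the last claim covering residue i
def pvOwner (claims : List (Int × Int × Int)) (i : Int) : Option Int :=
  claims.foldl (fun best t => if t.2.1 ≤ i ∧ i < t.2.2 then some t.1 else best) none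

def convert_interval_to_map_alt (domains : List String) (nres : Int) : List (Option Int) :=
  (PySem.List.pyRange 0 nres 1).map (fun i => pvOwner (pvClaims domains) i)

-- ===== PRECONDITION & SPEC =====
def Spec_convert_interval_to_map (domains : List String) (nres : Int) (out : List (Option Int)) : Prop := out = convert_interval_to_map_alt domains nres
instance (domains : List String) (nres : Int) (out : List (Option Int)) : Decidable (Spec_convert_interval_to_map domains nres out) := by unfold Spec_convert_interval_to_map; infer_instance

-- ===== CLAIM (what is proved, stated in full; the proofs are below) =====
def Claim_equal_convert_interval_to_map : Prop := ∀ (domains : List String) (nres : Int), Dom_convert_interval_to_map domains nres → Spec_convert_interval_to_map domains nres (convert_interval_to_map domains nres)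

-- ===== LEMMAS AND PROOFS =====


-- painting preserves the array length
theorem pvPaintA_length (i e v : Int) (m : List (Option Int)) :
    (pvPaintA m i e v).length = m.length := by
  generalize hn : (e - i).toNat = n
  induction n generalizing i m with
  | zero => rw [pvPaintA, if_neg (by omega)]
  | succ n ih =>
    rw [pvPaintA]
    by_cases h : i < e
    · rw [if_pos h]
      cases hset : PySem.List.pySet? m i (some v) with
      | none => rfl
      | some m' =>
        have hm' : m'.length = m.length := by
          have hd : PySem.List.pySetD m i (some v) = m' := by
            simp [PySem.List.pySetD, hset]
          rw [← hd, PySem.List.length_pySetD]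
        rw [ih (i + 1) m' (by omega), hm']
    · rw [if_neg h]

-- what one paint pass leaves at position k (for a non-negative start, as A's parsed
-- starts always are): painted iff i ≤ k < e, otherwise untouched
theorem pvPaintA_get (i e v : Int) (m : List (Option Int)) (k : Nat)
    (hi : 0 ≤ i) (hk : k < m.length) :
    (pvPaintA m i e v)[k]? = if i ≤ (k : Int) ∧ (k : Int) < e then some (some v) else m[k]? := by
  generalize hn : (e - i).toNat = n
  induction n generalizing i m with
  | zero =>
    rw [pvPaintA, if_neg (by omega), if_neg (by omega)]
  | succ n ih =>
    obtain ⟨j, rfl⟩ := Int.eq_ofNat_of_zero_le hi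
    rw [pvPaintA]
    by_cases h : (j : Int) < e
    · rw [if_pos h]
      by_cases hlt : j < m.length
      · have hset : PySem.List.pySet? m (j : Int) (some v) = some (m.set j (some v)) :=
          PySem.List.pySet?_natCast m j (some v) hlt
        rw [hset]
        have hk2 : k < (m.set j (some v)).length := by simpa using hk
        rw [ih (j + 1) _ (by omega) hk2 (by omega)]
        rw [List.getElem?_set]
        by_cases hki : k = j
        · subst hki
          rw [if_neg (by omega), if_pos rfl, if_pos hlt, if_pos (by omega)]
        · rw [if_neg (fun hh => hki (Eq.symm hh))]
          by_cases hcond : (j : Int) + 1 ≤ (k : Int) ∧ (k : Int) < e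
          · rw [if_pos hcond, if_pos (by omega)]
          · rw [if_neg hcond, if_neg (by omega)]
      · have hset : PySem.List.pySet? m (j : Int) (some v) = none := by
          rw [PySem.List.pySet?_eq_none_iff]
          simp only [PySem.Raise.InRange]
          omega
        rw [hset, if_neg (by omega)]
    · rw [if_neg h, if_neg (by omega)]

-- pieces of a split at '-' contain no '-'
theorem splitOn_go_no_dash (fuel : Nat) (l cur : List Char) (acc : List (List Char))
    (hfuel : l.length < fuel) (hcur : '-' ∉ cur) (hacc : ∀ p ∈ acc, '-' ∉ p) :
    ∀ p ∈ PySem.Chars.splitOn.go ['-'] fuel l cur acc, '-' ∉ p := by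
  induction fuel generalizing l cur acc with
  | zero => omega
  | succ fuel ih =>
    cases l with
    | nil =>
      have hstep : PySem.Chars.splitOn.go ['-'] (fuel + 1) [] cur acc
          = (cur.reverse :: acc).reverse := rfl
      rw [hstep]
      intro p hp
      simp only [List.mem_reverse, List.mem_cons] at hp
      rcases hp with hp | hp
      · subst hp; simpa using hcur
      · exact hacc p hp
    | cons c rest =>
      have hstep : PySem.Chars.splitOn.go ['-'] (fuel + 1) (c :: rest) cur acc
          = (if ['-'].isPrefixOf (c :: rest)
              then PySem.Chars.splitOn.go ['-'] fuel (List.drop ['-'].length (c :: rest)) []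
                    (cur.reverse :: acc)
              else PySem.Chars.splitOn.go ['-'] fuel rest (c :: cur) acc) := rfl
      rw [hstep]
      by_cases hc : c = '-'
      · rw [if_pos (by simp [List.isPrefixOf, hc])]
        simp only [List.length_singleton, List.drop_one, List.tail_cons]
        refine ih rest [] (cur.reverse :: acc) (by simpa using hfuel) (by simp) ?_
        intro p hp
        rcases List.mem_cons.mp hp with hp | hp
        · subst hp; simpa using hcur
        · exact hacc p hp
      · rw [if_neg (by simp [List.isPrefixOf]; exact fun h => (hc h.symm).elim)]
        refine ih rest (c :: cur) acc (by simpa using hfuel) ?_ hacc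
        intro hmem
        rcases List.mem_cons.mp hmem with h | h
        · exact hc h.symm
        · exact hcur h

theorem splitOn_no_dash (cs : List Char) : ∀ p ∈ PySem.Chars.splitOn cs ['-'], '-' ∉ p := by
  rw [PySem.Chars.splitOn]
  exact splitOn_go_no_dash (cs.length + 1) cs [] [] (by omega) (by simp) (by simp)

-- a bound Nat cast through Option's bind is non-negative
theorem pvBindCastNonneg (X : Option Nat) (k : Int)
    (h : (do let a ← X; pure ((a : Int)) : Option Int) = some k) : 0 ≤ k := by
  cases X
  · exact absurd h (by simp)
  · rename_i b
    obtain rfl : ((b : Int)) = k := by simpa using h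
    exact Int.natCast_nonneg b

-- int(s) on a string without '-' is non-negative
theorem ofChars?_nonneg (cs : List Char) (k : Int)
    (hnd : '-' ∉ cs) (h : PySem.Int.ofChars? cs = some k) : 0 ≤ k := by
  have hsub : ∀ c ∈ (List.dropWhile PySem.Int.isIntSpace
      (List.dropWhile PySem.Int.isIntSpace cs).reverse).reverse, c ∈ cs := by
    intro c hc
    rw [List.mem_reverse] at hc
    have hc2 := (List.dropWhile_sublist _).mem hc
    rw [List.mem_reverse] at hc2
    exact (List.dropWhile_sublist _).mem hc2
  unfold PySem.Int.ofChars? at h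
  dsimp only at h
  split at h
  · rename_i ds heq
    exact absurd (hsub '-' (by rw [heq]; exact List.mem_cons_self ..)) hnd
  · simp only [Option.map_eq_some_iff] at h
    obtain ⟨a, ha, rfl⟩ := h
    exact pvBindCastNonneg _ a ha
  · simp only [Option.map_eq_some_iff] at h
    obtain ⟨a, ha, rfl⟩ := h
    exact pvBindCastNonneg _ a ha

-- the first parsed number of a part is non-negative (its string holds no '-')
theorem mapM_head_nonneg (part : List Char) (s e : Int)
    (heq : (PySem.Chars.splitOn part ['-']).mapM PySem.Int.ofChars? = some [s, e]) :
    0 ≤ s := by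
  rcases hsp : PySem.Chars.splitOn part ['-'] with - | ⟨p1, ps⟩ <;> rw [hsp] at heq
  · simp at heq
  · rw [List.mapM_cons] at heq
    cases hb : PySem.Int.ofChars? p1 with
    | none => rw [hb] at heq; simp at heq
    | some b =>
      rw [hb] at heq
      cases hbs : List.mapM PySem.Int.ofChars? ps with
      | none => rw [hbs] at heq; simp at heq
      | some bs =>
        rw [hbs] at heq
        obtain ⟨rfl, -⟩ : b = s ∧ bs = [e] := by simpa using heq
        exact ofChars?_nonneg p1 b
          (splitOn_no_dash part p1 (by rw [hsp]; exact List.mem_cons_self ..)) hb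

-- one part of A's loop, written through B's parser
theorem pvPartA_eq_none (indx : Int) (m : List (Option Int)) (part : List Char)
    (hq : pvParseB part = none) : pvPartA indx m part = m := by
  unfold pvPartA
  unfold pvParseB at hq
  rcases hm : (PySem.Chars.splitOn part ['-']).mapM PySem.Int.ofChars? with - | l
  · rfl
  · rw [hm] at hq
    rcases l with - | ⟨s, - | ⟨e, - | ⟨x, xs⟩⟩⟩ <;> first | rfl | simp at hq

theorem pvPartA_eq_some (indx : Int) (m : List (Option Int)) (part : List Char)
    (q : Int × Int) (hq : pvParseB part = some q) :
    pvPartA indx m part = pvPaintA m q.1 q.2 (indx + 1) := by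
  unfold pvPartA
  unfold pvParseB at hq
  rcases hm : (PySem.Chars.splitOn part ['-']).mapM PySem.Int.ofChars? with - | l
  · rw [hm] at hq; simp at hq
  · rw [hm] at hq
    rcases l with - | ⟨s, - | ⟨e, - | ⟨x, xs⟩⟩⟩ <;> first
      | (obtain rfl : ((if s = 0 then 1 else s) - 1, e) = q := by simpa using hq
         rfl)
      | simp at hq

-- every claim's lower bound is non-negative
theorem pvClaims_lo_nonneg (domains : List String) :
    ∀ t ∈ pvClaims domains, 0 ≤ t.2.1 := by
  intro t ht
  unfold pvClaims at ht
  simp only [List.mem_flatMap, List.mem_filterMap, Option.map_eq_some_iff] at ht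
  obtain ⟨p, -, part, -, q, hq, rfl⟩ := ht
  unfold pvParseB at hq
  split at hq
  · rename_i s e heq
    obtain rfl : ((if s = 0 then 1 else s) - 1, e) = q := by simpa using hq
    have hs : 0 ≤ s := mapM_head_nonneg part s e heq
    dsimp only
    split <;> omega
  · simp at hq

-- A's whole nested loop is the fold of single paints over the claim list
theorem convA_eq_claims_fold (domains : List String) (nres : Int) :
    convert_interval_to_map domains nres =
      (pvClaims domains).foldl (fun m t => pvPaintA m t.2.1 t.2.2 t.1)
        ((PySem.List.pyRange 0 nres 1).map (fun _ => (none : Option Int))) := by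
  unfold convert_interval_to_map pvClaims
  dsimp only
  rw [List.foldl_flatMap]
  apply PySem.List.foldl_congr_mem
  intro m p _
  rw [List.foldl_filterMap]
  apply PySem.List.foldl_congr_mem
  intro m' part _
  rcases hq : pvParseB part with - | q
  · exact pvPartA_eq_none p.1 m' part hq
  · exact pvPartA_eq_some p.1 m' part q hq

-- length through the claims fold
theorem claims_fold_length (claims : List (Int × Int × Int)) (m : List (Option Int)) :
    ((claims.foldl (fun m t => pvPaintA m t.2.1 t.2.2 t.1) m)).length = m.length := by
  induction claims generalizing m with
  | nil => rfl
  | cons t claims ih => rw [List.foldl_cons, ih, pvPaintA_length]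

-- folding paints = folding the owner update pointwise
theorem claims_fold_get (claims : List (Int × Int × Int))
    (hlo : ∀ t ∈ claims, 0 ≤ t.2.1) (m : List (Option Int)) (k : Nat) (hk : k < m.length) :
    ((claims.foldl (fun m t => pvPaintA m t.2.1 t.2.2 t.1) m))[k]? =
      some (claims.foldl (fun best t => if t.2.1 ≤ (k : Int) ∧ (k : Int) < t.2.2 then some t.1 else best)
        (m.getD k none)) := by
  induction claims generalizing m with
  | nil =>
    rw [List.foldl_nil, List.foldl_nil, List.getD_eq_getElem?_getD,
      List.getElem?_eq_getElem hk]
    rfl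
  | cons t claims ih =>
    simp only [List.foldl_cons]
    have hk' : k < (pvPaintA m t.2.1 t.2.2 t.1).length := by
      rw [pvPaintA_length]; exact hk
    rw [ih (fun u hu => hlo u (List.mem_cons_of_mem _ hu)) _ hk']
    congr 1
    rw [List.getD_eq_getElem?_getD,
      pvPaintA_get _ _ _ _ _ (hlo t (List.mem_cons_self ..)) hk]
    by_cases hc : t.2.1 ≤ (k : Int) ∧ (k : Int) < t.2.2
    · rw [if_pos hc, if_pos hc]; rfl
    · rw [if_neg hc, if_neg hc, List.getD_eq_getElem?_getD]

-- ===== VERDICT (by name: the statement is the Claim_ definition above) =====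
theorem convert_interval_to_map_spec : Claim_equal_convert_interval_to_map := by
  intro domains nres _
  unfold Spec_convert_interval_to_map
  rw [convA_eq_claims_fold]
  unfold convert_interval_to_map_alt
  apply List.ext_getElem?
  intro k
  by_cases hk : k < (PySem.List.pyRange 0 nres 1).length
  · have hk0 : k < ((PySem.List.pyRange 0 nres 1).map (fun _ => (none : Option Int))).length := by
      simpa using hk
    rw [claims_fold_get _ (pvClaims_lo_nonneg domains) _ k hk0]
    rw [List.getElem?_map, List.getElem?_eq_getElem hk]
    have hval : (PySem.List.pyRange 0 nres 1)[k] = (k : Int) := by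
      rw [PySem.List.getElem_pyRange_one]; omega
    rw [hval]
    unfold pvOwner
    rw [Option.map_some]
    congr 1
    simp [List.getD_eq_getElem?_getD]
  · have h1 : ((pvClaims domains).foldl (fun m t => pvPaintA m t.2.1 t.2.2 t.1)
        ((PySem.List.pyRange 0 nres 1).map (fun _ => (none : Option Int))))[k]? = none := by
      apply List.getElem?_eq_none
      rw [claims_fold_length, List.length_map]
      omega
    have h2 : (((PySem.List.pyRange 0 nres 1)).map
        (fun i => pvOwner (pvClaims domains) i))[k]? = none := by
      apply List.getElem?_eq_none
      rw [List.length_map]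
      omega
    rw [h1, h2]
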